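-- pv_equiv track=rewrite | github.com/kliewerdaniel/stratagent | backend/app/services/continuous_improvement.py | _extract_improvements_from_text
-- ===== SOURCE A (Python) =====
-- from typing import Dict, List, Any, Optional, Tuple
--
-- def _extract_improvements_from_text(text: str) -> List[Dict[str, Any]]:
--     """Extract improvement suggestions from text response"""
--     improvements = []
--     lines = text.split('\n')
--
--     current_improvement = {}
--     for line in lines:
--         line = line.strip()
--         if line.startswith('-') or line.startswith('*'):
--             if current_improvement:
--                 improvements.append(current_improvement)
--             current_improvement = {"description": line.lstrip('-* ').strip()}
--         elif ':' in line and current_improvement: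
--             key, value = line.split(':', 1)
--             key = key.strip().lower().replace(' ', '_')
--             current_improvement[key] = value.strip()
--
--     if current_improvement:
--         improvements.append(current_improvement)
--
--     return improvements[:5]  # Limit to 5 improvements
-- ===== SOURCE B (Python) =====
-- from typing import Dict, List, Any
--
-- def _to_improvement(group: List[str]) -> Dict[str, Any]:
--     imp = {"description": group[0].lstrip('-* ').strip()}
--     for ln in group[1:]:
--         if ':' in ln:
--             key, value = ln.split(':', 1)
--             imp[key.strip().lower().replace(' ', '_')] = value.strip()
--     return imp
--
-- def _extract_improvements_from_text(text: str) -> List[Dict[str, Any]]: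
--     """Extract improvement suggestions from text response"""
--     stripped = [ln.strip() for ln in text.split('\n')]
--     groups: List[List[str]] = []
--     for ln in stripped:
--         if ln.startswith('-') or ln.startswith('*'):
--             groups.append([ln])
--         elif groups:
--             groups[-1].append(ln)
--     return [_to_improvement(g) for g in groups[:5]]
-- ===== Notes on version B (the rewrite author's own statement) =====
-- stated objective: alternative
-- what changed: Replaces A's single stateful pass (accumulating a current dict and flushing it on each bullet) with a two-phase decomposition: first partition the stripped lines into bullet-led groups, then map each of the first five groups independently to its improvement dict.
import Mathlib
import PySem

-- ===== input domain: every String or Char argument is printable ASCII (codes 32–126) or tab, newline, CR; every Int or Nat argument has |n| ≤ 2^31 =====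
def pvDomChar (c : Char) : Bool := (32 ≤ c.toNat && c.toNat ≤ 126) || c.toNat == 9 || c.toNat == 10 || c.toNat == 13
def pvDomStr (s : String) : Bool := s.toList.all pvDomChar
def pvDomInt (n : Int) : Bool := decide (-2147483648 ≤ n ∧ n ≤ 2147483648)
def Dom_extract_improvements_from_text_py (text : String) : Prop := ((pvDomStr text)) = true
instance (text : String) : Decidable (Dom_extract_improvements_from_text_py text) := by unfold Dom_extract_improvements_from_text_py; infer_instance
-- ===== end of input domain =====

-- B replaces A's single stateful accumulator pass with a group-partition phase followed by a
-- per-group mapping phase (objective: alternative decomposition; same asymptotic cost).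

-- ===== PORT A =====
-- hand port of str.lstrip('-* '): drops leading characters belonging to the set {'-','*',' '} (exact)
def pyA_lstripBullet (cs : List Char) : List Char :=
  cs.dropWhile (fun c => c == '-' || c == '*' || c == ' ')

-- one iteration of A's for-loop over (improvements, current_improvement)
def pyA_step (st : List (PySem.Dict String String) × PySem.Dict String String) (line : List Char) :
    List (PySem.Dict String String) × PySem.Dict String String :=
  let l := PySem.Chars.strip line
  if PySem.Chars.startswith l ['-'] || PySem.Chars.startswith l ['*'] then
    ((if st.2.items.isEmpty then st.1 else st.1 ++ [st.2]),
     PySem.Dict.empty.insert "description" (String.ofList (PySem.Chars.strip (pyA_lstripBullet l))))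
  else if PySem.Chars.isIn [':'] l && !st.2.items.isEmpty then
    match PySem.Chars.splitMax? l [':'] 1 with
    | some (k :: v :: _) =>
        (st.1, st.2.insert
          (String.ofList (PySem.Chars.replace (PySem.Chars.lower (PySem.Chars.strip k)) [' '] ['_']))
          (String.ofList (PySem.Chars.strip v)))
    | _ => (st.1, st.2)     -- unreachable: ':' in l guarantees a 2-way split
  else st

def extract_improvements_from_text_py (text : String) : List (List (String × String)) :=
  let lines := PySem.Chars.splitOn text.toList ['\n']
  let st := lines.foldl pyA_step ([], PySem.Dict.empty)
  let improvements := if st.2.items.isEmpty then st.1 else st.1 ++ [st.2]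
  (improvements.take 5).map (·.items)

-- ===== PORT B =====
-- hand port of str.lstrip('-* '): drops leading characters belonging to the set {'-','*',' '} (exact)
def pyB_lstripBullet (cs : List Char) : List Char :=
  cs.dropWhile (fun c => c == '-' || c == '*' || c == ' ')

-- groups[-1].append(ln)
def pyB_pushLast : List (List (List Char)) → List Char → List (List (List Char))
  | [], _ => []
  | [g], l => [g ++ [l]]
  | g :: g' :: gs, l => g :: pyB_pushLast (g' :: gs) l

-- one iteration of B's grouping loop
def pyB_groupStep (gs : List (List (List Char))) (l : List Char) : List (List (List Char)) :=
  if PySem.Chars.startswith l ['-'] || PySem.Chars.startswith l ['*'] then gs ++ [[l]]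
  else if gs.isEmpty then gs
  else pyB_pushLast gs l

-- _to_improvement: the first line of a group is the description, later ':'-lines become fields
def pyB_toImprovement (g : List (List Char)) : PySem.Dict String String :=
  match g with
  | [] => PySem.Dict.empty     -- unreachable: B only builds groups starting with a bullet line
  | h :: t =>
    t.foldl (fun d ln =>
      if PySem.Chars.isIn [':'] ln then
        match PySem.Chars.splitMax? ln [':'] 1 with
        | some (k :: v :: _) =>
            d.insert
              (String.ofList (PySem.Chars.replace (PySem.Chars.lower (PySem.Chars.strip k)) [' '] ['_']))
              (String.ofList (PySem.Chars.strip v))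
        | _ => d
      else d)
      (PySem.Dict.empty.insert "description" (String.ofList (PySem.Chars.strip (pyB_lstripBullet h))))

def extract_improvements_from_text_py_alt (text : String) : List (List (String × String)) :=
  let stripped := (PySem.Chars.splitOn text.toList ['\n']).map PySem.Chars.strip
  let groups := stripped.foldl pyB_groupStep []
  ((groups.take 5).map pyB_toImprovement).map (·.items)

-- ===== PRECONDITION & SPEC =====
def Spec_extract_improvements_from_text_py (text : String) (out : List (List (String × String))) : Prop := out = extract_improvements_from_text_py_alt text
instance (text : String) (out : List (List (String × String))) : Decidable (Spec_extract_improvements_from_text_py text out) := by unfold Spec_extract_improvements_from_text_py; infer_instance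

-- ===== CLAIM (what is proved, stated in full; the proofs are below) =====
def Claim_equal_extract_improvements_from_text_py : Prop := ∀ (text : String), Dom_extract_improvements_from_text_py text → Spec_extract_improvements_from_text_py text (extract_improvements_from_text_py text)

-- ===== LEMMAS AND PROOFS =====

-- A's step with the stripping factored out
def aStep (st : List (PySem.Dict String String) × PySem.Dict String String) (l : List Char) :
    List (PySem.Dict String String) × PySem.Dict String String :=
  if PySem.Chars.startswith l ['-'] || PySem.Chars.startswith l ['*'] then
    ((if st.2.items.isEmpty then st.1 else st.1 ++ [st.2]),
     PySem.Dict.empty.insert "description" (String.ofList (PySem.Chars.strip (pyA_lstripBullet l))))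
  else if PySem.Chars.isIn [':'] l && !st.2.items.isEmpty then
    match PySem.Chars.splitMax? l [':'] 1 with
    | some (k :: v :: _) =>
        (st.1, st.2.insert
          (String.ofList (PySem.Chars.replace (PySem.Chars.lower (PySem.Chars.strip k)) [' '] ['_']))
          (String.ofList (PySem.Chars.strip v)))
    | _ => (st.1, st.2)
  else st

-- the per-field step of B's _to_improvement, named for the proofs
def fieldStep (d : PySem.Dict String String) (ln : List Char) : PySem.Dict String String :=
  if PySem.Chars.isIn [':'] ln then
    match PySem.Chars.splitMax? ln [':'] 1 with
    | some (k :: v :: _) =>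
        d.insert
          (String.ofList (PySem.Chars.replace (PySem.Chars.lower (PySem.Chars.strip k)) [' '] ['_']))
          (String.ofList (PySem.Chars.strip v))
    | _ => d
  else d

lemma toImprovement_cons (h : List Char) (t : List (List Char)) :
    pyB_toImprovement (h :: t) =
      t.foldl fieldStep
        (PySem.Dict.empty.insert "description" (String.ofList (PySem.Chars.strip (pyB_lstripBullet h)))) := rfl

-- abstraction function from B's groups to A's loop state
def phi (g : List (List (List Char))) :
    List (PySem.Dict String String) × PySem.Dict String String :=
  (g.dropLast.map pyB_toImprovement,
   ((g.getLast?).map pyB_toImprovement).getD PySem.Dict.empty)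

lemma fieldStep_items (d : PySem.Dict String String) (ln : List Char)
    (hd : d.items.isEmpty = false) : (fieldStep d ln).items.isEmpty = false := by
  unfold fieldStep
  split_ifs with h
  · rcases hs : PySem.Chars.splitMax? ln [':'] 1 with _ | ⟨_ | ⟨k, _ | ⟨v, rest⟩⟩⟩ <;>
      simp only []
    all_goals first
      | exact hd
      | · rw [PySem.Dict.items_insert]
          split_ifs <;> simp_all
  · exact hd

lemma toImprovement_nonempty (g : List (List Char)) (hg : g ≠ []) :
    (pyB_toImprovement g).items.isEmpty = false := by
  rcases g with _ | ⟨h, t⟩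
  · exact absurd rfl hg
  rw [toImprovement_cons]
  have : ∀ (t : List (List Char)) (d : PySem.Dict String String),
      d.items.isEmpty = false → (t.foldl fieldStep d).items.isEmpty = false := by
    intro t
    induction t with
    | nil => intro d hd; exact hd
    | cons x xs ih => intro d hd; exact ih _ (fieldStep_items d x hd)
  exact this t _ rfl

lemma pushLast_concat (gs : List (List (List Char))) (gl : List (List Char)) (l : List Char) :
    pyB_pushLast (gs ++ [gl]) l = gs ++ [gl ++ [l]] := by
  induction gs with
  | nil => rfl
  | cons g gs ih =>
    obtain ⟨a, rest, e⟩ : ∃ a rest, gs ++ [gl] = a :: rest := by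
      rcases gs with _ | ⟨b, bs⟩ <;> exact ⟨_, _, rfl⟩
    simp only [List.cons_append, e, pyB_pushLast]
    rw [← e, ih]

lemma groups_nonempty (ls : List (List Char)) :
    ∀ gr ∈ ls.foldl pyB_groupStep [], gr ≠ [] := by
  induction ls using List.reverseRecOn with
  | nil => intro gr h; simp at h
  | append_singleton ls x ih =>
    rw [List.foldl_append]
    simp only [List.foldl_cons, List.foldl_nil]
    set G := ls.foldl pyB_groupStep [] with hG
    intro gr hgr
    rw [show pyB_groupStep G x = if PySem.Chars.startswith x ['-'] || PySem.Chars.startswith x ['*'] then G ++ [[x]] else if G.isEmpty then G else pyB_pushLast G x from rfl] at hgr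
    split_ifs at hgr with h1 h2
    · rcases List.mem_append.mp hgr with h | h
      · exact ih gr h
      · simp at h; simp [h]
    · exact ih gr hgr
    · have hne : G ≠ [] := by
        intro e; rw [e] at h2; exact h2 rfl
      rcases List.eq_nil_or_concat G with e | ⟨gs, gl, e⟩
      · exact absurd e hne
      rw [List.concat_eq_append] at e
      rw [e, pushLast_concat] at hgr
      rcases List.mem_append.mp hgr with h | h
      · exact ih gr (by rw [e]; exact List.mem_append.mpr (Or.inl h))
      · simp at h; simp [h]

lemma flush_phi (g : List (List (List Char))) (hg : ∀ gr ∈ g, gr ≠ []) :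
    (if (phi g).2.items.isEmpty then (phi g).1 else (phi g).1 ++ [(phi g).2])
      = g.map pyB_toImprovement := by
  rcases List.eq_nil_or_concat g with e | ⟨gs, gl, e⟩
  · subst e; simp [phi, PySem.Dict.empty]
  rw [List.concat_eq_append] at e
  subst e
  have hgl : gl ≠ [] := hg gl (List.mem_append.mpr (Or.inr (by simp)))
  simp [phi, toImprovement_nonempty gl hgl]

lemma step_commute (G : List (List (List Char))) (hgne : ∀ gr ∈ G, gr ≠ []) (x : List Char) :
    aStep (phi G) x = phi (pyB_groupStep G x) := by
  by_cases h1 : (PySem.Chars.startswith x ['-'] || PySem.Chars.startswith x ['*']) = true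
  · rw [show pyB_groupStep G x = G ++ [[x]] from by unfold pyB_groupStep; rw [if_pos h1]]
    rw [show aStep (phi G) x =
        ((if (phi G).2.items.isEmpty then (phi G).1 else (phi G).1 ++ [(phi G).2]),
         PySem.Dict.empty.insert "description"
           (String.ofList (PySem.Chars.strip (pyA_lstripBullet x)))) from by
      unfold aStep; rw [if_pos h1]]
    rw [flush_phi G hgne]
    simp [phi, pyB_toImprovement, pyA_lstripBullet, pyB_lstripBullet]
  · rcases List.eq_nil_or_concat G with e | ⟨gs, gl, e⟩
    · subst e
      rw [show pyB_groupStep [] x = [] from by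
        unfold pyB_groupStep; rw [if_neg h1]; rfl]
      show aStep ([], PySem.Dict.empty) x = ([], PySem.Dict.empty)
      unfold aStep
      rw [if_neg h1]
      have hemp : (PySem.Dict.empty : PySem.Dict String String).items.isEmpty = true := rfl
      rw [hemp]
      simp
    · rw [List.concat_eq_append] at e
      subst e
      have hgl : gl ≠ [] := hgne gl (by simp)
      rcases gl with _ | ⟨gh, gt⟩
      · exact absurd rfl hgl
      rw [show pyB_groupStep (gs ++ [gh :: gt]) x = gs ++ [(gh :: gt) ++ [x]] from by
        unfold pyB_groupStep; rw [if_neg h1, if_neg (by simp), pushLast_concat]]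
      have hphi1 : (phi (gs ++ [gh :: gt])).1 = gs.map pyB_toImprovement := by simp [phi]
      have hphi2 : (phi (gs ++ [gh :: gt])).2 = pyB_toImprovement (gh :: gt) := by simp [phi]
      have hne2 : (phi (gs ++ [gh :: gt])).2.items.isEmpty = false := by
        rw [hphi2]; exact toImprovement_nonempty _ (by simp)
      have hlast : pyB_toImprovement ((gh :: gt) ++ [x]) =
          fieldStep (pyB_toImprovement (gh :: gt)) x := by
        rw [List.cons_append, toImprovement_cons, toImprovement_cons, List.foldl_append]
        rfl
      have hphiR1 : (phi (gs ++ [(gh :: gt) ++ [x]])).1 = gs.map pyB_toImprovement := by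
        simp [phi]
      have hphiR2 : (phi (gs ++ [(gh :: gt) ++ [x]])).2 =
          fieldStep (pyB_toImprovement (gh :: gt)) x := by
        simp only [phi, List.getLast?_append_cons, List.getLast?_cons, List.getLast?_nil]
        simp [← hlast]
      unfold aStep
      rw [if_neg h1, hne2]
      simp only [Bool.not_false, Bool.and_true]
      by_cases h3 : PySem.Chars.isIn [':'] x = true
      · rw [if_pos h3]
        have hfs : fieldStep (pyB_toImprovement (gh :: gt)) x =
            (match PySem.Chars.splitMax? x [':'] 1 with
             | some (k :: v :: _) =>
                (pyB_toImprovement (gh :: gt)).insert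
                  (String.ofList (PySem.Chars.replace (PySem.Chars.lower (PySem.Chars.strip k)) [' '] ['_']))
                  (String.ofList (PySem.Chars.strip v))
             | _ => pyB_toImprovement (gh :: gt)) := by
          unfold fieldStep; rw [if_pos h3]
        rcases hs : PySem.Chars.splitMax? x [':'] 1 with _ | ⟨_ | ⟨k, _ | ⟨v, rest⟩⟩⟩ <;>
          rw [hs] at hfs <;>
          simp only [hs] <;>
          refine Prod.ext ?_ ?_ <;>
          simp only [hphi1, hphi2, hphiR1, hphiR2, hfs]
      · rw [if_neg h3]
        have hfs : fieldStep (pyB_toImprovement (gh :: gt)) x = pyB_toImprovement (gh :: gt) := by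
          unfold fieldStep; rw [if_neg h3]
        refine Prod.ext ?_ ?_
        · rw [hphiR1, hphi1]
        · rw [hphiR2, hfs, hphi2]

lemma invariant (ls : List (List Char)) :
    ls.foldl aStep ([], PySem.Dict.empty) = phi (ls.foldl pyB_groupStep []) := by
  induction ls using List.reverseRecOn with
  | nil => rfl
  | append_singleton ls x ih =>
    rw [List.foldl_append, List.foldl_append]
    simp only [List.foldl_cons, List.foldl_nil]
    rw [ih, step_commute _ (groups_nonempty ls) x]

-- ===== VERDICT (by name: the statement is the Claim_ definition above) =====
theorem extract_improvements_from_text_py_spec : Claim_equal_extract_improvements_from_text_py := by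
  intro text _
  unfold Spec_extract_improvements_from_text_py
  unfold extract_improvements_from_text_py extract_improvements_from_text_py_alt
  dsimp only
  rw [show pyA_step = (fun st l => aStep st (PySem.Chars.strip l)) from rfl,
      ← List.foldl_map, invariant,
      flush_phi _ (groups_nonempty _), ← List.map_take]
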